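-- pv_equiv track=rewrite | github.com/to-be-pass/python-coding-test | src/BGM-109/ch_05/solution_004.py | solution
-- ===== SOURCE A (Python) =====
-- def grade(answer, pattern):
--     grade = 0
--     n = len(pattern)
--     for i, a in enumerate(answer):
--         if a == pattern[(i % n)]:
--             grade += 1
--     return grade;
--
-- def solution(answers):
--     s1 = [1, 2, 3, 4, 5]
--     s2 = [2, 1, 2, 3, 2, 4, 2, 5]
--     s3 = [3, 3, 1, 1, 2, 2, 4, 4, 5, 5]
--     students = [s1, s2, s3]
--     # 학생들의 점수
--     grades = [grade(answers, s) for s in students]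
--     # 최고 득점
--     max_g = max(grades)
--     # 결과
--     result = []
--     for i, g in enumerate(grades):
--         if g == max_g:
--             result.append(i + 1)
--     return result
-- ===== SOURCE B (Python) =====
-- def solution(answers):
--     patterns = [[1, 2, 3, 4, 5],
--                 [2, 1, 2, 3, 2, 4, 2, 5],
--                 [3, 3, 1, 1, 2, 2, 4, 4, 5, 5]]
--     # One pass builds a histogram of (index mod 40, answer) pairs (40 = lcm of the
--     # pattern lengths); each score is then 40 histogram lookups, independent of n.
--     cnt = {}
--     for i, a in enumerate(answers):
--         k = (i % 40, a)
--         cnt[k] = cnt.get(k, 0) + 1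
--     scores = [sum(cnt.get((r, p[r % len(p)]), 0) for r in range(40)) for p in patterns]
--     best = max(scores)
--     return [j + 1 for j, s in enumerate(scores) if s == best]
-- ===== Notes on version B (the rewrite author's own statement) =====
-- stated objective: alternative
-- what changed: Replaces the per-student scans of the answers (grade() called once per pattern) with a single histogram pass: B builds a dict counting (index mod 40, answer) pairs (40 = lcm of the pattern lengths), then computes each score as 40 dictionary lookups, so the answers are traversed exactly once and scoring is O(1) per student.
import Mathlib
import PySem

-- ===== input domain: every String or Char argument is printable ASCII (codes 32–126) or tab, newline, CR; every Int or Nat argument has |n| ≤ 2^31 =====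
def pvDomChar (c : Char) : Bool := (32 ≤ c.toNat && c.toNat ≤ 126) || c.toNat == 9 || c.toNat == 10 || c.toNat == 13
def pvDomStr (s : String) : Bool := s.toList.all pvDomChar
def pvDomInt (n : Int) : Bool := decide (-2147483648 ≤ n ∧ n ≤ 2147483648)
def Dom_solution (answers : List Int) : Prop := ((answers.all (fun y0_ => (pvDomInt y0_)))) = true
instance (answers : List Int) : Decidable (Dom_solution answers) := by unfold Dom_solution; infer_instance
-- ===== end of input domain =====

-- B replaces the per-pattern scans of the answers with one histogram pass over
-- (index mod 40, answer) pairs (40 = lcm of the pattern lengths) followed by 40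
-- dictionary lookups per student; same O(n) cost, a different algorithm.

-- ===== PORT A =====
-- grade(answer, pattern): pattern[(i % n)] is always in range here (n = len(pattern) > 0),
-- so 'pyGet? … = some a' is exactly Python's 'a == pattern[i % n]'.
def pyGrade (answer pattern : List Int) : Int :=
  let n : Int := pattern.length
  (PySem.List.enumerate answer 0).foldl
    (fun g p => if PySem.List.pyGet? pattern (PySem.Int.mod p.1 n) = some p.2 then g + 1 else g) 0

def solution (answers : List Int) : List Int :=
  let s1 : List Int := [1, 2, 3, 4, 5]
  let s2 : List Int := [2, 1, 2, 3, 2, 4, 2, 5]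
  let s3 : List Int := [3, 3, 1, 1, 2, 2, 4, 4, 5, 5]
  let students := [s1, s2, s3]
  let grades := students.map (fun s => pyGrade answers s)
  match PySem.List.max? grades (fun g => g) with
  | some maxG =>
      (PySem.List.enumerate grades 0).foldl
        (fun r p => if p.2 = maxG then r ++ [p.1 + 1] else r) []
  | none => []  -- unreachable: grades always has three elements

-- ===== PORT B =====
-- the histogram loop 'for i, a in enumerate(answers): k = (i % 40, a); cnt[k] = cnt.get(k, 0) + 1'
def pvCnt (answers : List Int) : PySem.Dict (Int × Int) Int :=
  (PySem.List.enumerate answers 0).foldl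
    (fun d q =>
      let k : Int × Int := (PySem.Int.mod q.1 40, q.2)
      d.insert k (d.getD k 0 + 1))
    PySem.Dict.empty

-- p[r % len(p)] is always in range (r ∈ range(40), len(p) > 0)
def solution_alt (answers : List Int) : List Int :=
  let patterns : List (List Int) :=
    [[1, 2, 3, 4, 5], [2, 1, 2, 3, 2, 4, 2, 5], [3, 3, 1, 1, 2, 2, 4, 4, 5, 5]]
  let cnt := pvCnt answers
  let scores := patterns.map (fun p =>
    ((PySem.List.pyRange 0 40 1).map
        (fun r => cnt.getD (r, PySem.List.pyGetD p (PySem.Int.mod r (p.length : Int)) 0) 0)).sum)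
  match PySem.List.max? scores (fun g => g) with
  | some best =>
      ((PySem.List.enumerate scores 0).filter (fun q => q.2 == best)).map (fun q => q.1 + 1)
  | none => []  -- unreachable: scores always has three elements

-- ===== PRECONDITION & SPEC =====
def Spec_solution (answers : List Int) (out : List Int) : Prop := out = solution_alt answers
instance (answers : List Int) (out : List Int) : Decidable (Spec_solution answers out) := by unfold Spec_solution; infer_instance

-- ===== CLAIM (what is proved, stated in full; the proofs are below) =====
def Claim_equal_solution : Prop := ∀ (answers : List Int), Dom_solution answers → Spec_solution answers (solution answers)

-- ===== LEMMAS AND PROOFS =====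

-- a sum over a duplicate-free list whose terms vanish except at one member is that term
lemma sum_single (f : Int → Int) (m : Int) : ∀ (R : List Int), R.Nodup → m ∈ R →
    (∀ r ∈ R, r ≠ m → f r = 0) → (R.map f).sum = f m := by
  intro R
  induction R with
  | nil => intro _ hm; cases hm
  | cons r t ih =>
      intro hnd hm h0
      rcases List.mem_cons.mp hm with rfl | hmt
      · have ht : (t.map f).sum = 0 := by
          apply List.sum_eq_zero
          intro x hx
          obtain ⟨y, hy, rfl⟩ := List.mem_map.mp hx
          exact h0 y (List.mem_cons_of_mem _ hy)
            (fun h => (List.nodup_cons.mp hnd).1 (h ▸ hy))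
        simp [ht]
      · have hr : f r = 0 := h0 r List.mem_cons_self
          (fun h => (List.nodup_cons.mp hnd).1 (h ▸ hmt))
        have ht := ih (List.nodup_cons.mp hnd).2 hmt
          (fun x hx hxm => h0 x (List.mem_cons_of_mem _ hx) hxm)
        simp [hr, ht]

-- one enumerate entry hits exactly one residue class of the 40
lemma hit (p : List Int) (hp : 0 < p.length) (hd : (p.length : Int) ∣ 40) (i a : Int) :
    ((PySem.List.pyRange 0 40 1).map
        (fun r => if ((PySem.Int.mod i 40, a) : Int × Int)
            = (r, PySem.List.pyGetD p (PySem.Int.mod r (p.length : Int)) 0) then (1 : Int) else 0)).sum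
    = if PySem.List.pyGet? p (PySem.Int.mod i (p.length : Int)) = some a then 1 else 0 := by
  have hl : (0 : Int) < (p.length : Int) := by exact_mod_cast hp
  set m := PySem.Int.mod i 40 with hm
  have hm0 : 0 ≤ m := PySem.Int.mod_nonneg i (by norm_num)
  have hm40 : m < 40 := PySem.Int.mod_lt i (by norm_num)
  -- i % len = (i % 40) % len since len ∣ 40
  have hmod : PySem.Int.mod i (p.length : Int) = PySem.Int.mod m (p.length : Int) := by
    rw [hm, PySem.Int.mod_eq_emod_of_pos hl, PySem.Int.mod_eq_emod_of_pos hl,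
        PySem.Int.mod_eq_emod_of_pos (by norm_num : (0:Int) < 40)]
    exact (Int.emod_emod_of_dvd i hd).symm
  have hj0 : 0 ≤ PySem.Int.mod m (p.length : Int) := PySem.Int.mod_nonneg m hl
  have hjl : PySem.Int.mod m (p.length : Int) < (p.length : Int) := PySem.Int.mod_lt m hl
  rw [sum_single _ m _ (PySem.List.nodup_pyRange_one 0 40)
        ((PySem.List.mem_pyRange_one).mpr ⟨hm0, hm40⟩)
        (by intro r _ hr
            rw [if_neg]
            intro h
            exact hr (congrArg Prod.fst h).symm)]
  rw [hmod, PySem.List.pyGet?_eq_some_getElem _ hj0 hjl,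
      PySem.List.pyGetD_eq_getElem _ _ hj0 hjl]
  simp [Prod.ext_iff, eq_comm]

-- the 40 histogram lookups for pattern p sum to A's grade count
lemma score_eq (p : List Int) (hp : 0 < p.length) (hd : (p.length : Int) ∣ 40)
    (answers : List Int) :
    ((PySem.List.pyRange 0 40 1).map
        (fun r => (pvCnt answers).getD
            (r, PySem.List.pyGetD p (PySem.Int.mod r (p.length : Int)) 0) 0)).sum
    = pyGrade answers p := by
  have hcnt : pvCnt answers
      = PySem.Dict.counter ((PySem.List.enumerate answers 0).map
          (fun q : Int × Int => ((PySem.Int.mod q.1 40, q.2) : Int × Int))) := by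
    rw [pvCnt, ← PySem.Dict.foldl_insert_getD_add_one_eq_counter, List.foldl_map]
  rw [hcnt, pyGrade]
  rw [PySem.List.foldl_ite_add_one]
  simp only [PySem.Dict.getD_counter, zero_add]
  induction (PySem.List.enumerate answers 0) with
  | nil => simp
  | cons q t ih =>
      simp only [List.map_cons, List.count_cons, List.countP_cons]
      simp only [Nat.cast_add, Nat.cast_ite, Nat.cast_one, Nat.cast_zero, beq_iff_eq,
        decide_eq_true_eq]
      rw [PySem.List.sum_map_add_int, ih, hit p hp hd q.1 q.2]

-- endgame on the three abstract scores: A's append loop vs B's filter/map comprehension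
lemma endgame (a b c : Int) :
    (match PySem.List.max? [a, b, c] (fun g => g) with
     | some m => (PySem.List.enumerate [a, b, c] 0).foldl
          (fun (r : List Int) (p : Int × Int) => if p.2 = m then r ++ [p.1 + 1] else r) []
     | none => []) =
    (match PySem.List.max? [a, b, c] (fun g => g) with
     | some best => ((PySem.List.enumerate [a, b, c] 0).filter
          (fun q : Int × Int => q.2 == best)).map (fun q : Int × Int => q.1 + 1)
     | none => []) := by
  simp only [PySem.List.max?_id_cons, List.foldl_cons, List.foldl_nil,
    PySem.List.enumerate_cons, PySem.List.enumerate_nil, List.filter_cons, List.filter_nil,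
    beq_iff_eq]
  split_ifs <;> simp

-- ===== VERDICT (by name: the statement is the Claim_ definition above) =====
theorem solution_spec : Claim_equal_solution := by
  intro answers _
  show solution answers = solution_alt answers
  unfold solution solution_alt
  dsimp only
  simp only [List.map_cons, List.map_nil]
  rw [score_eq _ (by norm_num) (by norm_num), score_eq _ (by norm_num) (by norm_num),
      score_eq _ (by norm_num) (by norm_num)]
  exact endgame _ _ _
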